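-- pv_equiv track=rewrite | github.com/JeiKeiLim/TIL | coding_test/leetcode/2381_Shifting_Letters_II.py | shiftingLetters4
-- ===== SOURCE A (Python) =====
-- from typing import List
--
-- def shiftingLetters4(s: str, shifts: List[List[int]]) -> str:
--     dis = [0] * (len(s) + 1)
--     for i in range(len(shifts)):  # O (m)
--         di = (shifts[i][2] * 2) - 1
--
--         dis[shifts[i][0]] += di
--         dis[shifts[i][1] + 1] -= di
--
--     prefix = 0
--     ord_a = ord("a")
--     ss = [ord(s[i]) - ord_a for i in range(len(s))]  # O (n)
--     for i in range(len(ss)):  # O (n)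
--         prefix += dis[i]
--         ss[i] = (ss[i] + prefix) % 26
--
--     return "".join([chr(ord_a + ss[i]) for i in range(len(ss))])
-- ===== SOURCE B (Python) =====
-- def shiftingLetters4(s, shifts):
--     n = len(s)
--     shift = [0] * n
--     for op in shifts:
--         start, end, direction = op[0], op[1], op[2]
--         delta = direction * 2 - 1
--         for i in range(start, end + 1):
--             shift[i] += delta
--     ord_a = ord("a")
--     return "".join(chr(ord_a + (ord(c) - ord_a + k) % 26) for c, k in zip(s, shift))
-- ===== Notes on version B (the rewrite author's own statement) =====
-- stated objective: simpler
-- what changed: B drops the difference-array-plus-prefix-sum machinery and just adds each operation's delta directly to every index of its range in a plain shift array, then maps each character once; Pre_ keeps the task's guaranteed domain 0 <= start <= end+1 <= len(s), outside which A raises or both programs shift unspecified positions.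
-- outside the precondition, e.g. on shiftingLetters4('ab', [[2, 0, 1]]): A returns 'aa', B returns 'ab'; on shiftingLetters4('ab', [[-1, 1, 1]]): A returns 'ab', B returns 'bd'
import Mathlib
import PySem

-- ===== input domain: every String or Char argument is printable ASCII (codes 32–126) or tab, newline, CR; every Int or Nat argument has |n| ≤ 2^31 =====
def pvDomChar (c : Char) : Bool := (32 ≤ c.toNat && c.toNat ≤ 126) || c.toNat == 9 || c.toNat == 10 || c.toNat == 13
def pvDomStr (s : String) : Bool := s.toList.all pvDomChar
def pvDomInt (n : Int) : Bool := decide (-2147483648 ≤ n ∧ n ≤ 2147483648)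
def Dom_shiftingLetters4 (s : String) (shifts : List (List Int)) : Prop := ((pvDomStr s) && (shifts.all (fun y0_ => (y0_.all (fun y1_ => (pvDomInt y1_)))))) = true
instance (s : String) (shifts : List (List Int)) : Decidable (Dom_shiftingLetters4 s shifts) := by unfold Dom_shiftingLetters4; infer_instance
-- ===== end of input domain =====

-- B replaces A's difference-array + prefix-sum accumulation by directly adding each
-- operation's delta to every index of its range in a plain shift array (simpler, not faster).


-- ===== PORT A =====
def shiftingLetters4 (s : String) (shifts : List (List Int)) : String :=
  let cs := s.toList
  let dis0 : List Int := List.replicate (cs.length + 1) 0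
  let dis := (PySem.List.pyRange 0 (shifts.length : Int) 1).foldl (fun dis i =>
      let op := PySem.List.pyGetD shifts i []
      let di := (PySem.List.pyGetD op 2 0) * 2 - 1
      let d1 := PySem.List.pySetD dis (PySem.List.pyGetD op 0 0)
                  (PySem.List.pyGetD dis (PySem.List.pyGetD op 0 0) 0 + di)
      PySem.List.pySetD d1 (PySem.List.pyGetD op 1 0 + 1)
                  (PySem.List.pyGetD d1 (PySem.List.pyGetD op 1 0 + 1) 0 - di)) dis0
  let ss0 : List Int := (PySem.List.pyRange 0 (cs.length : Int) 1).map
      (fun i => ((PySem.List.pyGetD cs i 'a').toNat : Int) - 97)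
  let st := (PySem.List.pyRange 0 (ss0.length : Int) 1).foldl
      (fun (st : Int × List Int) i =>
        let pref := st.1 + PySem.List.pyGetD dis i 0
        (pref, PySem.List.pySetD st.2 i (PySem.Int.mod (PySem.List.pyGetD st.2 i 0 + pref) 26)))
      (0, ss0)
  let ss := st.2
  String.ofList ((PySem.List.pyRange 0 (ss.length : Int) 1).map
      (fun i => Char.ofNat (97 + (PySem.List.pyGetD ss i 0)).toNat))

-- ===== PORT B =====
def shiftingLetters4_alt (s : String) (shifts : List (List Int)) : String :=
  let cs := s.toList
  let shift := shifts.foldl (fun sh op =>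
      let start := PySem.List.pyGetD op 0 0
      let stop := PySem.List.pyGetD op 1 0
      let delta := PySem.List.pyGetD op 2 0 * 2 - 1
      (PySem.List.pyRange start (stop + 1) 1).foldl
        (fun sh i => PySem.List.pySetD sh i (PySem.List.pyGetD sh i 0 + delta)) sh)
    (List.replicate cs.length (0 : Int))
  String.ofList ((cs.zip shift).map (fun ck =>
      Char.ofNat (97 + (PySem.Int.mod ((ck.1.toNat : Int) - 97 + ck.2) 26)).toNat))

-- ===== PRECONDITION & SPEC =====
-- Pre_ restricts the operations to the task's natural domain (each op carries at least
-- [start, end, direction] with 0 ≤ start ≤ end+1 ≤ len(s), as the problem statement guarantees);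
-- outside it A raises IndexError, or, for negative or reversed endpoints, the two programs shift
-- different positions (Python negative-index semantics vs. an empty/negative range) and neither
-- choice is specified by the task, so either value is defensible.
def Pre_shiftingLetters4 (s : String) (shifts : List (List Int)) : Prop :=
  ∀ op ∈ shifts, 3 ≤ op.length ∧ 0 ≤ op.getD 0 0 ∧ op.getD 0 0 ≤ op.getD 1 0 + 1 ∧
    op.getD 1 0 + 1 ≤ (s.toList.length : Int)
instance (s : String) (shifts : List (List Int)) : Decidable (Pre_shiftingLetters4 s shifts) := by
  unfold Pre_shiftingLetters4; infer_instance

def pvWitness_shiftingLetters4 : String × List (List Int) := ("abcz", [[0, 2, 1], [1, 3, 0]])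

def Spec_shiftingLetters4 (s : String) (shifts : List (List Int)) (out : String) : Prop := out = shiftingLetters4_alt s shifts
instance (s : String) (shifts : List (List Int)) (out : String) : Decidable (Spec_shiftingLetters4 s shifts out) := by unfold Spec_shiftingLetters4; infer_instance

-- ===== CLAIM (what is proved, stated in full; the proofs are below) =====
def Claim_equal_shiftingLetters4 : Prop := ∀ (s : String) (shifts : List (List Int)), Dom_shiftingLetters4 s shifts → Pre_shiftingLetters4 s shifts → Spec_shiftingLetters4 s shifts (shiftingLetters4 s shifts)

-- ===== LEMMAS AND PROOFS =====

def pvPf (dis : List Int) (j : Nat) : Int := (dis.take (j+1)).sum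

lemma pv_sum_take_set (xs : List Int) (v : Int) :
    ∀ (k t : Nat), k < xs.length →
    ((xs.set k v).take t).sum = (xs.take t).sum + (if k < t then v - xs.getD k 0 else 0) := by
  induction xs with
  | nil => intro k t hk; simp at hk
  | cons x xs ih =>
    intro k t hk
    cases k with
    | zero =>
      cases t with
      | zero => simp
      | succ t => simp [List.getD]; ring
    | succ k =>
      cases t with
      | zero => simp
      | succ t =>
        have := ih k t (by simpa using hk)
        simp only [List.set, List.take, List.sum_cons, List.getD_cons_succ, this]
        split_ifs with h1 h2 h2 <;> omega

lemma pv_foldB_aux (δ : Int) (k : Nat) : ∀ (a : Int) (sh : List Int), 0 ≤ a →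
    a + (k:Int) ≤ (sh.length : Int) →
    (((PySem.List.pyRange a (a + (k:Int))).foldl
        (fun sh i => PySem.List.pySetD sh i (PySem.List.pyGetD sh i 0 + δ)) sh).length = sh.length) ∧
    ∀ j : Nat, ((PySem.List.pyRange a (a + (k:Int))).foldl
        (fun sh i => PySem.List.pySetD sh i (PySem.List.pyGetD sh i 0 + δ)) sh).getD j 0
      = sh.getD j 0 + (if a ≤ (j:Int) ∧ (j:Int) < a + (k:Int) then δ else 0) := by
  induction k with
  | zero =>
    intro a sh h0 hb
    rw [show a + ((0:Nat):Int) = a by push_cast; ring, PySem.List.pyRange_one_eq_nil le_rfl]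
    constructor
    · rfl
    · intro j; simp
  | succ k ih =>
    intro a sh h0 hb
    have hcast : a + ((k+1:Nat):Int) = (a + (k:Int)) + 1 := by push_cast; ring
    rw [hcast, PySem.List.pyRange_one_succ_right (by omega), List.foldl_append]
    obtain ⟨ihl, ihg⟩ := ih a sh h0 (by push_cast at hb ⊢; omega)
    set r := (PySem.List.pyRange a (a + (k:Int))).foldl
        (fun sh i => PySem.List.pySetD sh i (PySem.List.pyGetD sh i 0 + δ)) sh with hr
    simp only [List.foldl_cons, List.foldl_nil]
    have hm0 : (0:Int) ≤ a + (k:Int) := by omega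
    have hmlt : (a + (k:Int)).toNat < r.length := by rw [ihl]; omega
    rw [PySem.List.pySetD_of_nonneg _ _ hm0, PySem.List.pyGetD_of_nonneg _ _ hm0]
    constructor
    · rw [List.length_set, ihl]
    · intro j
      have hgd : ∀ w : Int, (r.set (a + (k:Int)).toNat w).getD j 0
          = if (a + (k:Int)).toNat = j then w else r.getD j 0 := by
        intro w
        simp only [List.getD, List.getElem?_set, hmlt, if_true]
        split_ifs <;> simp
      rw [hgd]
      by_cases hj : (a + (k:Int)).toNat = j
      · have hje : (j:Int) = a + (k:Int) := by omega
        rw [if_pos hj, hj, ihg j]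
        have hn1 : ¬(a ≤ (j:Int) ∧ (j:Int) < a + (k:Int)) := by omega
        have hp2 : a ≤ (j:Int) ∧ (j:Int) < a + (k:Int) + 1 := by omega
        rw [if_neg hn1, if_pos hp2]; ring
      · rw [if_neg hj, ihg j]
        have : ((a ≤ (j:Int) ∧ (j:Int) < a + (k:Int))) ↔ ((a ≤ (j:Int) ∧ (j:Int) < a + (k:Int) + 1)) := by omega
        split_ifs with h1 h2 h2 <;> first | rfl | omega

lemma pv_foldB (δ a b : Int) (sh : List Int) (h0 : 0 ≤ a) (hab : a ≤ b) (hb : b ≤ (sh.length : Int)) :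
    (((PySem.List.pyRange a b).foldl
        (fun sh i => PySem.List.pySetD sh i (PySem.List.pyGetD sh i 0 + δ)) sh).length = sh.length) ∧
    ∀ j : Nat, ((PySem.List.pyRange a b).foldl
        (fun sh i => PySem.List.pySetD sh i (PySem.List.pyGetD sh i 0 + δ)) sh).getD j 0
      = sh.getD j 0 + (if a ≤ (j:Int) ∧ (j:Int) < b then δ else 0) := by
  have hbk : b = a + ((b - a).toNat : Int) := by omega
  rw [hbk]
  exact pv_foldB_aux δ (b - a).toNat a sh h0 (by omega)

lemma pv_stepA (dis : List Int) (n : Nat) (a b di : Int) (hlen : dis.length = n+1)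
    (h0 : 0 ≤ a) (hab : a ≤ b + 1) (hb : b + 1 ≤ (n:Int)) :
    (PySem.List.pySetD (PySem.List.pySetD dis a (PySem.List.pyGetD dis a 0 + di)) (b + 1)
       (PySem.List.pyGetD (PySem.List.pySetD dis a (PySem.List.pyGetD dis a 0 + di)) (b + 1) 0 - di)).length = n+1 ∧
    ∀ j : Nat, j < n →
      pvPf (PySem.List.pySetD (PySem.List.pySetD dis a (PySem.List.pyGetD dis a 0 + di)) (b + 1)
       (PySem.List.pyGetD (PySem.List.pySetD dis a (PySem.List.pyGetD dis a 0 + di)) (b + 1) 0 - di)) j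
      = pvPf dis j + (if a ≤ (j:Int) ∧ (j:Int) ≤ b then di else 0) := by
  have hb1 : (0:Int) ≤ b + 1 := by omega
  have hka : a.toNat < dis.length := by omega
  rw [PySem.List.pySetD_of_nonneg _ _ h0, PySem.List.pyGetD_of_nonneg _ _ h0,
      PySem.List.pySetD_of_nonneg _ _ hb1, PySem.List.pyGetD_of_nonneg _ _ hb1]
  set d1 := dis.set a.toNat (dis.getD a.toNat 0 + di) with hd1
  have hd1len : d1.length = n + 1 := by rw [hd1, List.length_set, hlen]
  have hkb : (b+1).toNat < d1.length := by omega
  constructor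
  · rw [List.length_set, hd1len]
  · intro j hj
    unfold pvPf
    have e2 := pv_sum_take_set d1 (d1.getD (b+1).toNat 0 - di) (b+1).toNat (j+1) hkb
    have e1 := pv_sum_take_set dis (dis.getD a.toNat 0 + di) a.toNat (j+1) hka
    rw [e2, hd1, e1]
    have hv1 : dis.getD a.toNat 0 + di - dis.getD a.toNat 0 = di := by ring
    rw [hv1]
    have hv2 : d1.getD (b+1).toNat 0 - di - d1.getD (b+1).toNat 0 = -di := by ring
    rw [hd1] at hv2
    rw [hv2]
    have hcast1 : a.toNat < j + 1 ↔ a ≤ (j:Int) := by omega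
    have hcast2 : (b+1).toNat < j + 1 ↔ b + 1 ≤ (j:Int) := by omega
    split_ifs with h1 h2 h3 h2 h3 h3 <;> omega

lemma pv_mainInv (n : Nat) :
    ∀ (ops : List (List Int)),
    (∀ op ∈ ops, 3 ≤ op.length ∧ 0 ≤ op.getD 0 0 ∧ op.getD 0 0 ≤ op.getD 1 0 + 1 ∧
        op.getD 1 0 + 1 ≤ (n:Int)) →
    ∀ (dis sh : List Int), dis.length = n + 1 → sh.length = n →
    (∀ j : Nat, j < n → pvPf dis j = sh.getD j 0) →
    (ops.foldl (fun dis op =>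
        PySem.List.pySetD
          (PySem.List.pySetD dis (op.getD 0 0)
            (PySem.List.pyGetD dis (op.getD 0 0) 0 + (op.getD 2 0 * 2 - 1)))
          (op.getD 1 0 + 1)
          (PySem.List.pyGetD
            (PySem.List.pySetD dis (op.getD 0 0)
              (PySem.List.pyGetD dis (op.getD 0 0) 0 + (op.getD 2 0 * 2 - 1)))
            (op.getD 1 0 + 1) 0 - (op.getD 2 0 * 2 - 1))) dis).length = n + 1 ∧
    (ops.foldl (fun sh op =>
        (PySem.List.pyRange (op.getD 0 0) (op.getD 1 0 + 1)).foldl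
          (fun sh i => PySem.List.pySetD sh i
            (PySem.List.pyGetD sh i 0 + (op.getD 2 0 * 2 - 1))) sh) sh).length = n ∧
    (∀ j : Nat, j < n →
      pvPf (ops.foldl (fun dis op =>
        PySem.List.pySetD
          (PySem.List.pySetD dis (op.getD 0 0)
            (PySem.List.pyGetD dis (op.getD 0 0) 0 + (op.getD 2 0 * 2 - 1)))
          (op.getD 1 0 + 1)
          (PySem.List.pyGetD
            (PySem.List.pySetD dis (op.getD 0 0)
              (PySem.List.pyGetD dis (op.getD 0 0) 0 + (op.getD 2 0 * 2 - 1)))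
            (op.getD 1 0 + 1) 0 - (op.getD 2 0 * 2 - 1))) dis) j
      = (ops.foldl (fun sh op =>
        (PySem.List.pyRange (op.getD 0 0) (op.getD 1 0 + 1)).foldl
          (fun sh i => PySem.List.pySetD sh i
            (PySem.List.pyGetD sh i 0 + (op.getD 2 0 * 2 - 1))) sh) sh).getD j 0) := by
  intro ops
  induction ops with
  | nil => intro _ dis sh h1 h2 h3; exact ⟨h1, h2, h3⟩
  | cons op ops ih =>
    intro hpre dis sh h1 h2 h3
    have hop := hpre op List.mem_cons_self
    have hops : ∀ o ∈ ops, 3 ≤ o.length ∧ 0 ≤ o.getD 0 0 ∧ o.getD 0 0 ≤ o.getD 1 0 + 1 ∧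
        o.getD 1 0 + 1 ≤ (n:Int) := fun o ho => hpre o (List.mem_cons_of_mem _ ho)
    obtain ⟨hL, h0a, hab, hbn⟩ := hop
    simp only [List.foldl_cons]
    have hA := pv_stepA dis n (op.getD 0 0) (op.getD 1 0) (op.getD 2 0 * 2 - 1) h1 h0a hab hbn
    have hB := pv_foldB (op.getD 2 0 * 2 - 1) (op.getD 0 0) (op.getD 1 0 + 1) sh h0a hab (by omega)
    refine ih hops _ _ hA.1 (hB.1.trans h2) ?_
    intro j hj
    rw [hA.2 j hj, hB.2 j, h3 j hj]
    have hiff : ((op.getD 0 0 ≤ (j:Int) ∧ (j:Int) ≤ op.getD 1 0)) ↔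
        (op.getD 0 0 ≤ (j:Int) ∧ (j:Int) < op.getD 1 0 + 1) := by omega
    simp only [hiff]

lemma pv_loopA (dis : List Int) :
    ∀ (k : Nat) (ss : List Int), k ≤ ss.length → k ≤ dis.length →
    ((PySem.List.pyRange 0 (k:Int)).foldl (fun (st : Int × List Int) i =>
        (st.1 + PySem.List.pyGetD dis i 0,
         PySem.List.pySetD st.2 i
           (PySem.Int.mod (PySem.List.pyGetD st.2 i 0 + (st.1 + PySem.List.pyGetD dis i 0)) 26)))
        (0, ss)).1 = (dis.take k).sum ∧
    ((PySem.List.pyRange 0 (k:Int)).foldl (fun (st : Int × List Int) i =>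
        (st.1 + PySem.List.pyGetD dis i 0,
         PySem.List.pySetD st.2 i
           (PySem.Int.mod (PySem.List.pyGetD st.2 i 0 + (st.1 + PySem.List.pyGetD dis i 0)) 26)))
        (0, ss)).2.length = ss.length ∧
    ∀ j : Nat, ((PySem.List.pyRange 0 (k:Int)).foldl (fun (st : Int × List Int) i =>
        (st.1 + PySem.List.pyGetD dis i 0,
         PySem.List.pySetD st.2 i
           (PySem.Int.mod (PySem.List.pyGetD st.2 i 0 + (st.1 + PySem.List.pyGetD dis i 0)) 26)))
        (0, ss)).2.getD j 0
      = if j < k then PySem.Int.mod (ss.getD j 0 + (dis.take (j+1)).sum) 26 else ss.getD j 0 := by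
  intro k
  induction k with
  | zero =>
    intro ss hk hd
    rw [show ((0:Nat):Int) = 0 by rfl, PySem.List.pyRange_one_eq_nil le_rfl]
    refine ⟨by simp, by simp, ?_⟩
    intro j; simp
  | succ k ih =>
    intro ss hk hd
    have hk' : k ≤ ss.length := by omega
    have hd' : k ≤ dis.length := by omega
    obtain ⟨ih1, ih2, ih3⟩ := ih ss hk' hd'
    have hcast : (((k+1:Nat)):Int) = (k:Int) + 1 := by push_cast; ring
    rw [hcast, PySem.List.pyRange_one_succ_right (by positivity), List.foldl_append]
    set st := (PySem.List.pyRange 0 (k:Int)).foldl (fun (st : Int × List Int) i =>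
        (st.1 + PySem.List.pyGetD dis i 0,
         PySem.List.pySetD st.2 i
           (PySem.Int.mod (PySem.List.pyGetD st.2 i 0 + (st.1 + PySem.List.pyGetD dis i 0)) 26)))
        (0, ss) with hst
    simp only [List.foldl_cons, List.foldl_nil]
    have hkd : k < dis.length := by omega
    have hgdis : PySem.List.pyGetD dis (k:Int) 0 = dis[k] :=
      PySem.List.pyGetD_ofNat dis k 0 hkd
    have hst2k : PySem.List.pyGetD st.2 (k:Int) 0 = ss.getD k 0 := by
      rw [PySem.List.pyGetD_natCast, ih3 k, if_neg (by omega)]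
    have h1 : st.1 + PySem.List.pyGetD dis (k:Int) 0 = (dis.take (k+1)).sum := by
      rw [ih1, hgdis, List.sum_take_succ dis k hkd]
    refine ⟨h1, ?_, ?_⟩
    · simp only [PySem.List.pySetD_natCast, List.length_set, ih2]
    · intro j
      simp only [PySem.List.pySetD_natCast]
      have hklen : k < st.2.length := by omega
      rw [List.getD_eq_getElem?_getD, List.getElem?_set]
      by_cases hj : k = j
      · subst hj
        rw [if_pos rfl, if_pos hklen]
        simp only [Option.getD_some, hst2k, h1]
        rw [if_pos (by omega : k < k + 1)]
      · rw [if_neg hj, ← List.getD_eq_getElem?_getD, ih3 j]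
        have : (j < k) ↔ (j < k + 1) := by omega
        by_cases hjk : j < k
        · rw [if_pos hjk, if_pos (by omega)]
        · rw [if_neg hjk, if_neg (by omega)]


theorem shiftingLetters4_spec : Claim_equal_shiftingLetters4 := by
  unfold Claim_equal_shiftingLetters4
  intro s shifts _hdom hpre
  unfold Spec_shiftingLetters4
  unfold Pre_shiftingLetters4 at hpre
  simp only [shiftingLetters4, shiftingLetters4_alt]
  simp only [PySem.List.pyGetD_ofNat']
  -- name the pieces
  have hfoldA :
      (PySem.List.pyRange 0 (shifts.length : Int)).foldl
        (fun dis i =>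
          PySem.List.pySetD
            (PySem.List.pySetD dis ((PySem.List.pyGetD shifts i []).getD 0 0)
              (PySem.List.pyGetD dis ((PySem.List.pyGetD shifts i []).getD 0 0) 0 +
                ((PySem.List.pyGetD shifts i []).getD 2 0 * 2 - 1)))
            ((PySem.List.pyGetD shifts i []).getD 1 0 + 1)
            (PySem.List.pyGetD
                (PySem.List.pySetD dis ((PySem.List.pyGetD shifts i []).getD 0 0)
                  (PySem.List.pyGetD dis ((PySem.List.pyGetD shifts i []).getD 0 0) 0 +
                    ((PySem.List.pyGetD shifts i []).getD 2 0 * 2 - 1)))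
                ((PySem.List.pyGetD shifts i []).getD 1 0 + 1) 0 -
              ((PySem.List.pyGetD shifts i []).getD 2 0 * 2 - 1)))
        (List.replicate (s.toList.length + 1) 0)
      = shifts.foldl
        (fun dis op =>
          PySem.List.pySetD
            (PySem.List.pySetD dis (op.getD 0 0)
              (PySem.List.pyGetD dis (op.getD 0 0) 0 + (op.getD 2 0 * 2 - 1)))
            (op.getD 1 0 + 1)
            (PySem.List.pyGetD
                (PySem.List.pySetD dis (op.getD 0 0)
                  (PySem.List.pyGetD dis (op.getD 0 0) 0 + (op.getD 2 0 * 2 - 1)))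
                (op.getD 1 0 + 1) 0 - (op.getD 2 0 * 2 - 1)))
        (List.replicate (s.toList.length + 1) 0) :=
    PySem.List.foldl_pyRange_zero_pyGetD' shifts []
      (fun dis op =>
          PySem.List.pySetD
            (PySem.List.pySetD dis (op.getD 0 0)
              (PySem.List.pyGetD dis (op.getD 0 0) 0 + (op.getD 2 0 * 2 - 1)))
            (op.getD 1 0 + 1)
            (PySem.List.pyGetD
                (PySem.List.pySetD dis (op.getD 0 0)
                  (PySem.List.pyGetD dis (op.getD 0 0) 0 + (op.getD 2 0 * 2 - 1)))
                (op.getD 1 0 + 1) 0 - (op.getD 2 0 * 2 - 1)))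
      (List.replicate (s.toList.length + 1) 0)
  rw [hfoldA]
  have hbase : ∀ j : Nat, j < s.toList.length →
      pvPf (List.replicate (s.toList.length + 1) (0:Int)) j
        = (List.replicate s.toList.length (0:Int)).getD j 0 := by
    intro j hj
    simp [pvPf, List.take_replicate, List.sum_replicate]
  obtain ⟨hAlen, hBlen, hAB⟩ := pv_mainInv s.toList.length shifts hpre
      (List.replicate (s.toList.length + 1) 0) (List.replicate s.toList.length 0)
      (by simp) (by simp) hbase
  have hss0len : (List.map (fun i => ((PySem.List.pyGetD s.toList i 'a').toNat : Int) - 97)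
      (PySem.List.pyRange 0 (s.toList.length : Int))).length = s.toList.length := by
    simp [PySem.List.pyRange_zero_natCast]
  rw [hss0len]
  set disF := List.foldl
      (fun dis op =>
        PySem.List.pySetD
          (PySem.List.pySetD dis (op.getD 0 0) (PySem.List.pyGetD dis (op.getD 0 0) 0 + (op.getD 2 0 * 2 - 1)))
          (op.getD 1 0 + 1)
          (PySem.List.pyGetD
              (PySem.List.pySetD dis (op.getD 0 0) (PySem.List.pyGetD dis (op.getD 0 0) 0 + (op.getD 2 0 * 2 - 1)))
              (op.getD 1 0 + 1) 0 -
            (op.getD 2 0 * 2 - 1)))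
      (List.replicate (s.toList.length + 1) 0) shifts with hdisF
  set shF := List.foldl
      (fun sh op =>
        List.foldl (fun sh i => PySem.List.pySetD sh i (PySem.List.pyGetD sh i 0 + (op.getD 2 0 * 2 - 1))) sh
          (PySem.List.pyRange (op.getD 0 0) (op.getD 1 0 + 1)))
      (List.replicate s.toList.length 0) shifts with hshF
  set ss0 := List.map (fun i => ((PySem.List.pyGetD s.toList i 'a').toNat : Int) - 97)
      (PySem.List.pyRange 0 (s.toList.length : Int)) with hss0
  obtain ⟨hL1, hL2, hL3⟩ := pv_loopA disF s.toList.length ss0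
      (le_of_eq hss0len.symm) (by rw [hAlen]; omega)
  set ST := List.foldl
      (fun (st : Int × List Int) i =>
        (st.1 + PySem.List.pyGetD disF i 0,
          PySem.List.pySetD st.2 i
            (PySem.Int.mod (PySem.List.pyGetD st.2 i 0 + (st.1 + PySem.List.pyGetD disF i 0)) 26)))
      (0, ss0) (PySem.List.pyRange 0 (s.toList.length : Int)) with hST
  have hST2len : ST.2.length = s.toList.length := hL2.trans hss0len
  rw [hST2len]
  apply congrArg String.ofList
  apply List.ext_getElem
  · simp [PySem.List.pyRange_zero_natCast, hBlen]
  · intro j h1 h2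
    have hj : j < s.toList.length := by
      simpa [PySem.List.pyRange_zero_natCast] using h1
    have hjB : j < shF.length := by rw [hBlen]; exact hj
    -- element of A-side map
    have hAelem : (List.map (fun i => Char.ofNat (97 + PySem.List.pyGetD ST.2 i 0).toNat)
        (PySem.List.pyRange 0 (s.toList.length : Int)))[j]'h1
        = Char.ofNat (97 + PySem.List.pyGetD ST.2 (j : Int) 0).toNat := by
      have h? := PySem.List.getElem?_map_pyRange_zero
        (fun i => Char.ofNat (97 + PySem.List.pyGetD ST.2 i 0).toNat) s.toList.length j hj
      rw [List.getElem?_eq_getElem h1] at h?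
      exact Option.some.inj h?
    have hss0j : ss0.getD j 0 = ((s.toList[j]'hj).toNat : Int) - 97 := by
      have h? := PySem.List.getElem?_map_pyRange_zero
        (fun i => ((PySem.List.pyGetD s.toList i 'a').toNat : Int) - 97) s.toList.length j hj
      rw [List.getD_eq_getElem?_getD, hss0, h?]
      simp [PySem.List.pyGetD_ofNat s.toList j 'a' hj]
    rw [hAelem]
    rw [List.getElem_map, List.getElem_zip]
    rw [PySem.List.pyGetD_natCast, hL3 j, if_pos hj, hss0j]
    have hsum : (disF.take (j+1)).sum = shF[j]'hjB := by
      have := hAB j hj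
      unfold pvPf at this
      rw [this, List.getD_eq_getElem?_getD, List.getElem?_eq_getElem hjB]
      rfl
    rw [hsum]
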